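-- pv_equiv track=rewrite | github.com/kaluginpeter/algo_ds | algorithms/string/is_upper.py | is_upper
-- ===== SOURCE A (Python) =====
-- def is_upper(string: str) -> bool:
--     """
--     Function that return if all alphabetical characters in string have upper case,
--     if it is, function return True, otherwise return False.
--     Time complexity O(N).
--     Memory Complexity O(1).
--     Example of Usages:
--     is_upper('S1') -> True
--     is_upper('hello') -> False
--     :param string: object of string instance.
--     :return: boolean True of False.
--     """
--     alphabetical_chars: bool = False
--     for character in string:
--         if character.isalpha():
--             alphabetical_chars = True
--             if character != character.upper():
--                 return False
--     return alphabetical_chars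
-- ===== SOURCE B (Python) =====
-- def is_upper(string: str) -> bool:
--     # Whole-string formulation: no per-character loop.
--     # All alphabetic chars are uppercase  iff  the string is fixed by str.upper();
--     # at least one alphabetic char exists iff  str.lower() changes the string
--     # (given the first conjunct, some char is an uppercase letter).
--     return string == string.upper() and string != string.lower()
-- ===== Notes on version B (the rewrite author's own statement) =====
-- stated objective: alternative
-- what changed: Replaces the per-character scan with mutable flag and early return by two whole-string case-mapping comparisons: string == string.upper() (all alphabetic chars already uppercase) and string != string.lower() (some uppercase letter, hence some alphabetic char, exists).
import Mathlib
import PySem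

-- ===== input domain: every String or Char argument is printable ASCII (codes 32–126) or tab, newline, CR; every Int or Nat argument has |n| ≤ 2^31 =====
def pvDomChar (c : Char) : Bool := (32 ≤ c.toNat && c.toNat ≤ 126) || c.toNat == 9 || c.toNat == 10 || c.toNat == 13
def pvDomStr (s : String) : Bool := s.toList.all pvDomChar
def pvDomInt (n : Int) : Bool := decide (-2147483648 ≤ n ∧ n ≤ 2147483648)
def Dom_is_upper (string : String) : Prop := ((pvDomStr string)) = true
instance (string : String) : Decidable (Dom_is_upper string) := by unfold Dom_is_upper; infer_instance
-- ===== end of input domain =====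

-- ===== PORT A =====
-- A: single scan with a mutable flag and early return on a lowercase alpha char.
def isUpperGoA : List Char → Bool → Bool
  | [], acc => acc
  | c :: rest, acc =>
    if PySem.Chars.isalpha c then
      if c != PySem.Chars.upperChar c then false
      else isUpperGoA rest true
    else isUpperGoA rest acc

def is_upper (string : String) : Bool := isUpperGoA string.toList false

-- ===== PORT B =====
-- B: no per-character loop — two whole-string case-mapping comparisons.
def is_upper_alt (string : String) : Bool :=
  (string.toList == (PySem.Str.upper string).toList) &&
  !(string.toList == (PySem.Str.lower string).toList)

-- ===== PRECONDITION & SPEC =====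
def Spec_is_upper (string : String) (out : Bool) : Prop := out = is_upper_alt string
instance (string : String) (out : Bool) : Decidable (Spec_is_upper string out) := by unfold Spec_is_upper; infer_instance

-- ===== CLAIM (what is proved, stated in full; the proofs are below) =====
def Claim_equal_is_upper : Prop := ∀ (string : String), Dom_is_upper string → Spec_is_upper string (is_upper string)

-- ===== LEMMAS AND PROOFS =====

-- characterisation of A's loop: "some alpha seen (or flag)" AND "every alpha is its own uppercase"
lemma isUpperGoA_eq (l : List Char) (acc : Bool) :
    isUpperGoA l acc =
      ((l.any PySem.Chars.isalpha || acc) &&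
        l.all (fun c => !PySem.Chars.isalpha c || c == PySem.Chars.upperChar c)) := by
  induction l generalizing acc with
  | nil => simp [isUpperGoA]
  | cons c rest ih =>
    simp only [isUpperGoA, List.any_cons, List.all_cons]
    by_cases ha : PySem.Chars.isalpha c
    · by_cases hu : c = PySem.Chars.upperChar c
      · have hbe : (c == PySem.Chars.upperChar c) = true := beq_iff_eq.mpr hu
        rw [ih]; simp [ha, hbe]
        exact fun _ => hu
      · simp [ha, hu, bne_iff_ne]
    · simp [ha, ih]

lemma char_toNat_ofNat (n : Nat) (h : n < 55296) : (Char.ofNat n).toNat = n := by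
  have hv : n.isValidChar := Or.inl h
  rw [Char.ofNat, dif_pos hv]
  rfl

lemma map_eq_self_chars (f : Char → Char) (l : List Char) :
    l.map f = l ↔ ∀ x ∈ l, f x = x := by
  induction l with
  | nil => simp
  | cons a l ih => simp [ih]

lemma upperChar_ne_of_islower (c : Char) (h : PySem.Chars.islower c = true) :
    PySem.Chars.upperChar c ≠ c := by
  simp only [PySem.Chars.islower, Bool.and_eq_true, decide_eq_true_eq, Char.le_def] at h
  have h1 : 97 ≤ c.toNat := h.1
  have h2 : c.toNat ≤ 122 := h.2
  have hlt : c.toNat - 32 < 55296 := by omega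
  intro he
  have : (PySem.Chars.upperChar c).toNat = c.toNat := by rw [he]
  rw [PySem.Chars.upperChar] at this
  simp only [PySem.Chars.islower, Char.le_def] at this
  rw [if_pos (by simp [decide_eq_true_eq]; exact ⟨h.1, h.2⟩)] at this
  rw [char_toNat_ofNat _ hlt] at this
  omega

lemma lowerChar_ne_of_isupper (c : Char) (h : PySem.Chars.isupper c = true) :
    PySem.Chars.lowerChar c ≠ c := by
  simp only [PySem.Chars.isupper, Bool.and_eq_true, decide_eq_true_eq, Char.le_def] at h
  have h1 : 65 ≤ c.toNat := h.1
  have h2 : c.toNat ≤ 90 := h.2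
  have hlt : c.toNat + 32 < 55296 := by omega
  intro he
  have : (PySem.Chars.lowerChar c).toNat = c.toNat := by rw [he]
  rw [PySem.Chars.lowerChar] at this
  rw [if_pos (by simp [PySem.Chars.isupper, decide_eq_true_eq, Char.le_def]; exact ⟨h.1, h.2⟩)] at this
  rw [char_toNat_ofNat _ hlt] at this
  omega

lemma upperChar_eq_of_not_islower (c : Char) (h : PySem.Chars.islower c = false) :
    PySem.Chars.upperChar c = c := by
  simp [PySem.Chars.upperChar, h]

lemma lowerChar_eq_of_not_isupper (c : Char) (h : PySem.Chars.isupper c = false) :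
    PySem.Chars.lowerChar c = c := by
  simp [PySem.Chars.lowerChar, h]

-- the two formulations agree on every list of characters
lemma key (l : List Char) :
    ((l.any PySem.Chars.isalpha || false) &&
      l.all (fun c => !PySem.Chars.isalpha c || c == PySem.Chars.upperChar c)) =
    ((l == l.map PySem.Chars.upperChar) && !(l == l.map PySem.Chars.lowerChar)) := by
  rcases hall : l.all (fun c => !PySem.Chars.isalpha c || c == PySem.Chars.upperChar c) with _ | _
  · -- some alpha char is not its own uppercase: it must be a lowercase letter, so l ≠ map upperChar l
    obtain ⟨c, hc, hbad⟩ := List.all_eq_false.mp hall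
    have hup : PySem.Chars.upperChar c ≠ c := by
      intro he
      cases ha : PySem.Chars.isalpha c
      · rw [ha] at hbad; simp at hbad
      · rw [ha, he] at hbad; simp at hbad
    have hne : l ≠ l.map PySem.Chars.upperChar := by
      intro he
      have := ((map_eq_self_chars _ _).mp he.symm) c hc
      exact hup this
    have h1 : (l == l.map PySem.Chars.upperChar) = false := beq_eq_false_iff_ne.mpr hne
    rw [h1]
    simp
  · -- every alpha char is its own uppercase, hence l = map upperChar l;
    -- and "some alpha exists" ↔ "lower changes l" (the changed char must be an uppercase letter)
    simp only [List.all_eq_true] at hall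
    have hmap : l = l.map PySem.Chars.upperChar := by
      symm
      rw [map_eq_self_chars]
      intro c hc
      rcases hlo : PySem.Chars.islower c with _ | _
      · exact upperChar_eq_of_not_islower c hlo
      · have := hall c hc
        simp only [PySem.Chars.isalpha, hlo, Bool.or_true, Bool.not_true,
          Bool.false_or] at this
        exact absurd (beq_iff_eq.mp this).symm (upperChar_ne_of_islower c hlo)
    have h1 : (l == l.map PySem.Chars.upperChar) = true := beq_iff_eq.mpr hmap
    rcases hany : l.any PySem.Chars.isalpha with _ | _
    · -- no alpha char: lower fixes every char, so l = map lowerChar l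
      have hmap2 : l.map PySem.Chars.lowerChar = l := by
        rw [map_eq_self_chars]
        intro c hc
        have h5 := List.any_eq_false.mp hany c hc
        have hupf : PySem.Chars.isupper c = false := by
          cases h' : PySem.Chars.isupper c
          · rfl
          · rw [PySem.Chars.isalpha, h'] at h5; simp at h5
        exact lowerChar_eq_of_not_isupper c hupf
      have h2 : (l == l.map PySem.Chars.lowerChar) = true := beq_iff_eq.mpr hmap2.symm
      simp [h1, h2]
    · -- some alpha char c; it is its own uppercase, so it is an uppercase letter; lower moves it
      obtain ⟨c, hc, hal⟩ := List.any_eq_true.mp hany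
      have hup : PySem.Chars.isupper c = true := by
        rcases hlo : PySem.Chars.islower c with _ | _
        · simpa [PySem.Chars.isalpha, hlo] using hal
        · have := hall c hc
          simp only [PySem.Chars.isalpha, hlo, Bool.or_true, Bool.not_true,
            Bool.false_or] at this
          exact absurd (beq_iff_eq.mp this).symm (upperChar_ne_of_islower c hlo)
      have hne : l ≠ l.map PySem.Chars.lowerChar := by
        intro he
        exact lowerChar_ne_of_isupper c hup (((map_eq_self_chars _ _).mp he.symm) c hc)
      have h2 : (l == l.map PySem.Chars.lowerChar) = false := beq_eq_false_iff_ne.mpr hne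
      simp [h1, h2]

-- ===== VERDICT (by name: the statement is the Claim_ definition above) =====
theorem is_upper_spec : Claim_equal_is_upper := by
  intro s _
  unfold Spec_is_upper is_upper is_upper_alt
  rw [isUpperGoA_eq, key]
  simp only [PySem.Str.toList_upper, PySem.Str.toList_lower,
    PySem.Chars.upper, PySem.Chars.lower]
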